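-- pv_equiv track=rewrite | github.com/srimuthu/FSLM-Erika | flex_prio_tool/hptAnalyzer.py | responseHP
-- ===== SOURCE A (Python) =====
-- MAX_SIMULATION_TIME = 100000
--
-- T3_CT   = 5000
--
-- def responseHP(windowHP, at3):
--     t3rt = 0
--     returnValue = MAX_SIMULATION_TIME
--     for i in range(MAX_SIMULATION_TIME):
--         if (i > windowHP[0]) and (i <= windowHP[1]):
--             t3rt += 1
--         if (t3rt >= T3_CT):
--             returnValue = i - at3
--             break
--
--     return returnValue
-- ===== SOURCE B (Python) =====
-- MAX_SIMULATION_TIME = 100000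
--
-- T3_CT = 5000
--
-- def responseHP(windowHP, at3):
--     # closed form: the counter first reaches T3_CT at the T3_CT-th index i
--     # with windowHP[0] < i <= windowHP[1], counting from i = 0.
--     hit = max(0, windowHP[0] + 1) + T3_CT - 1
--     if hit <= windowHP[1] and hit < MAX_SIMULATION_TIME:
--         return hit - at3
--     return MAX_SIMULATION_TIME
-- ===== Notes on version B (the rewrite author's own statement) =====
-- stated objective: simpler
-- what changed: Replaces A's bounded counting loop (up to 100000 iterations) by a direct closed form: the counter first reaches T3_CT at index max(0, windowHP[0]+1)+T3_CT-1, bounds-checked against windowHP[1] and MAX_SIMULATION_TIME.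
-- outside the precondition, e.g. on responseHP([100000], 5001): A returns 100000, B raises IndexError
import Mathlib
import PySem

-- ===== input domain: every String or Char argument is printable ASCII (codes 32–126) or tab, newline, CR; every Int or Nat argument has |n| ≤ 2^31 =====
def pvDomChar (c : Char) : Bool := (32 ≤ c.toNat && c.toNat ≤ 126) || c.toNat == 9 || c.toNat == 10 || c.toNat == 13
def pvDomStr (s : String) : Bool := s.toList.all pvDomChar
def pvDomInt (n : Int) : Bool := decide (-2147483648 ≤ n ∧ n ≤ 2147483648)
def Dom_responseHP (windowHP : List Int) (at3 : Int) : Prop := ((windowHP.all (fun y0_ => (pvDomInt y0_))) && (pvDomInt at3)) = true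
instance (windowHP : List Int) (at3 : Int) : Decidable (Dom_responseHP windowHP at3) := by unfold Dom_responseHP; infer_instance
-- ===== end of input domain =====

-- B replaces A's bounded counting loop by a direct closed form for the break index (objective: simpler).

-- ===== PORT A =====
-- the for-loop of A as structural recursion on the remaining iteration count;
-- i is the current loop index, t3rt the running counter; fuel 0 = loop exhausted.
def responseHPLoop (w0 w1 at3 : Int) : Nat → Int → Int → Int
  | 0, _, _ => 100000
  | n + 1, i, t3rt =>
    let t3rt' := if i > w0 ∧ i ≤ w1 then t3rt + 1 else t3rt
    if t3rt' ≥ 5000 then i - at3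
    else responseHPLoop w0 w1 at3 n (i + 1) t3rt'

def responseHP (windowHP : List Int) (at3 : Int) : Int :=
  let w0 := (PySem.List.pyGet? windowHP 0).getD 0   -- windowHP[0]; Pre_ guarantees it exists
  let w1 := (PySem.List.pyGet? windowHP 1).getD 0   -- windowHP[1]
  responseHPLoop w0 w1 at3 100000 0 0

-- ===== PORT B =====
def responseHP_alt (windowHP : List Int) (at3 : Int) : Int :=
  let w0 := (PySem.List.pyGet? windowHP 0).getD 0
  let w1 := (PySem.List.pyGet? windowHP 1).getD 0
  let hit := max 0 (w0 + 1) + 5000 - 1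
  if hit ≤ w1 ∧ hit < 100000 then hit - at3 else 100000

-- ===== PRECONDITION & SPEC =====
-- Pre_ excludes lists shorter than 2: A usually raises IndexError there, and where it happens
-- to return (windowHP[0] so large that short-circuiting never reads windowHP[1]) B's natural
-- two-element read raises IndexError instead.
def Pre_responseHP (windowHP : List Int) (at3 : Int) : Prop := 2 ≤ windowHP.length
instance (windowHP : List Int) (at3 : Int) : Decidable (Pre_responseHP windowHP at3) := by unfold Pre_responseHP; infer_instance
def pvWitness_responseHP : List Int × Int := ([0, 5010], 3)
def Spec_responseHP (windowHP : List Int) (at3 : Int) (out : Int) : Prop := out = responseHP_alt windowHP at3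
instance (windowHP : List Int) (at3 : Int) (out : Int) : Decidable (Spec_responseHP windowHP at3 out) := by unfold Spec_responseHP; infer_instance

-- ===== CLAIM (what is proved, stated in full; the proofs are below) =====
def Claim_equal_responseHP : Prop := ∀ (windowHP : List Int) (at3 : Int), Dom_responseHP windowHP at3 → Pre_responseHP windowHP at3 → Spec_responseHP windowHP at3 (responseHP windowHP at3)

-- ===== LEMMAS AND PROOFS =====

-- characterisation of A's loop: starting at index i with counter t3rt ≤ 4999,
-- the counter first reaches 5000 at index max i (w0+1) + (5000 - t3rt) - 1,
-- provided that index lies in the window and within the remaining fuel.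
theorem responseHPLoop_eq (w0 w1 at3 : Int) :
    ∀ (n : Nat) (i t3rt : Int), t3rt ≤ 4999 →
      responseHPLoop w0 w1 at3 n i t3rt =
        (if max i (w0 + 1) + (5000 - t3rt) - 1 ≤ w1 ∧
            max i (w0 + 1) + (5000 - t3rt) - 1 < i + n
         then max i (w0 + 1) + (5000 - t3rt) - 1 - at3 else 100000) := by
  intro n
  induction n with
  | zero =>
    intro i t3rt ht
    simp only [responseHPLoop]
    rw [if_neg]
    rintro ⟨-, h2⟩
    have : i ≤ max i (w0 + 1) := le_max_left _ _
    omega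
  | succ n ih =>
    intro i t3rt ht
    simp only [responseHPLoop]
    by_cases hin : i > w0 ∧ i ≤ w1
    · rw [if_pos hin]
      by_cases hbrk : t3rt + 1 ≥ 5000
      · rw [if_pos hbrk, if_pos]
        · have hmax : max i (w0 + 1) = i := by omega
          rw [hmax]; omega
        · have hmax : max i (w0 + 1) = i := by omega
          rw [hmax]
          constructor <;> omega
      · rw [if_neg hbrk, ih (i + 1) (t3rt + 1) (by omega)]
        have hmax : max i (w0 + 1) = i := by omega
        have hmax' : max (i + 1) (w0 + 1) = i + 1 := by omega
        rw [hmax, hmax']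
        by_cases hc : i + 1 + (5000 - (t3rt + 1)) - 1 ≤ w1 ∧ i + 1 + (5000 - (t3rt + 1)) - 1 < i + 1 + n
        · rw [if_pos hc, if_pos (by omega)]; omega
        · rw [if_neg hc, if_neg (by omega)]
    · rw [if_neg hin, if_neg (by omega), ih (i + 1) t3rt ht]
      rcases not_and_or.mp hin with h | h
      · -- i ≤ w0 : counting has not started, the start index is unchanged
        have hmax : max i (w0 + 1) = w0 + 1 := by omega
        have hmax' : max (i + 1) (w0 + 1) = w0 + 1 := by omega
        rw [hmax, hmax']
        by_cases hc : w0 + 1 + (5000 - t3rt) - 1 ≤ w1 ∧ w0 + 1 + (5000 - t3rt) - 1 < i + 1 + n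
        · rw [if_pos hc, if_pos (by omega)]
        · rw [if_neg hc, if_neg (by omega)]
      · -- i > w1 (and i > w0): the window is already past, both sides give 100000
        have h1 : w1 < i := by omega
        rw [if_neg, if_neg]
        · rintro ⟨hle, -⟩
          have : i ≤ max i (w0 + 1) := le_max_left _ _
          omega
        · rintro ⟨hle, -⟩
          have : i + 1 ≤ max (i + 1) (w0 + 1) := le_max_left _ _
          omega

-- ===== VERDICT (by name: the statement is the Claim_ definition above) =====
theorem responseHP_spec : Claim_equal_responseHP := by
  intro windowHP at3 _ _
  unfold Spec_responseHP responseHP responseHP_alt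
  dsimp only
  rw [responseHPLoop_eq _ _ _ 100000 0 0 (by omega)]
  split_ifs <;> omega
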